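-- pv_equiv track=rewrite | github.com/somecollagist/Brubeck | Utils/qitint.py | GetClosestToZero
-- ===== SOURCE A (Python) =====
-- def GetClosestToZero(num : int, power : int):
--     scores = {
--         -2 : 0,
--         -1 : 0,
--          0 : 0,
--          1 : 0,
--          2 : 0
--     }
--
--     for score in scores:
--         scores[score] = abs(num - (score * (5 ** power)))
--
--     ret = scores[-2]
--     val = -2
--     for score in scores:
--         if scores[score] == 0:
--             return score
--         if scores[score] < ret:
--             ret = scores[score]
--             val = score
--
--     return val
-- ===== SOURCE B (Python) =====
-- def GetClosestToZero(num: int, power: int):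
--     m = 5 ** power
--     r0 = num // m
--     rem = num - r0 * m
--     r = r0 if 2 * rem < m else r0 + 1
--     return max(-2, min(2, r))
-- ===== Notes on version B (the rewrite author's own statement) =====
-- stated objective: faster
-- what changed: Replaces the dict of five candidate distances and the two scan loops by a closed-form integer rounding: one division by m = 5**power (computed once instead of ten times), round to the nearest multiple (exact, since m is odd no ties occur), and clamp the multiplier to [-2, 2].
-- outside the precondition, e.g. on GetClosestToZero(7, -600): A returns -2, B raises ZeroDivisionError; on GetClosestToZero(0, -1): A returns 0, B returns 0.0
import Mathlib
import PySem

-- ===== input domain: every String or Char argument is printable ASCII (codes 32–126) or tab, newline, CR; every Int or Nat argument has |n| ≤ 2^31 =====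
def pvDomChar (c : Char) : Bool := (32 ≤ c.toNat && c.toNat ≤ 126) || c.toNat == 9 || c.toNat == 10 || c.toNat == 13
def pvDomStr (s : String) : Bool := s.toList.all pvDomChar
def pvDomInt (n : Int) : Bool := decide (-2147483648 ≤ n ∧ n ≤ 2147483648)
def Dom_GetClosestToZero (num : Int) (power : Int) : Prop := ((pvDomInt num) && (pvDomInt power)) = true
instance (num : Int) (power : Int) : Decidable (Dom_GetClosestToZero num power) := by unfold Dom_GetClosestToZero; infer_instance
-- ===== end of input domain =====

-- B replaces A's five-candidate distance dict and two scan loops by a closed-form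
-- integer rounding (divide by 5**power once, round to nearest, clamp to [-2, 2]); objective: faster (measured).


-- ===== PORT A =====
-- Acore is A's body with m = 5 ** power passed in; Python's `5 ** power` is ported as
-- `(5 : Int) ^ power.toNat`, exact for power ≥ 0 (Pre_ requires it).  The dict `scores`
-- is PySem.Dict; `scores[score]` lookups hit keys that are always present, so `getD _ 0`
-- is exact; the early `return` in the second loop is the `Option Int` component.
def Acore (num m : Int) : Int :=
  let scores0 : PySem.Dict Int Int :=
    ((((PySem.Dict.empty.insert (-2) 0).insert (-1) 0).insert 0 0).insert 1 0).insert 2 0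
  let scores := scores0.keys.foldl (fun d score => d.insert score |num - score * m|) scores0
  let loop := scores.keys.foldl
    (fun st score =>
      match st with
      | (some r, ret, val) => (some r, ret, val)
      | (none, ret, val) =>
        if scores.getD score 0 = 0 then (some score, ret, val)
        else if scores.getD score 0 < ret then (none, scores.getD score 0, score)
        else (none, ret, val))
    ((none : Option Int), scores.getD (-2) 0, (-2 : Int))
  match loop with
  | (some r, _, _) => r
  | (none, _, val) => val

-- `5 ** power` is an Int only for power ≥ 0 (Pre_); for power < 0 Python yields a float,
-- which has no Int port — the guard makes the port total with a placeholder 0 outside Pre_.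
def GetClosestToZero (num : Int) (power : Int) : Int :=
  Acore num (if 0 ≤ power then (5 : Int) ^ power.toNat else 0)

-- ===== PORT B =====
def Bcore (num m : Int) : Int :=
  let r0 := PySem.Int.floordiv num m
  let rem := num - r0 * m
  let r := if 2 * rem < m then r0 else r0 + 1
  max (-2) (min 2 r)

-- Source B's `5 ** power` hand-ported as `5 ^ power.toNat`: exact for power ≥ 0 (Pre_);
-- for power < 0 Source B leaves the integers (float result / ZeroDivisionError).
def GetClosestToZero_alt (num : Int) (power : Int) : Int := Bcore num ((5 : Int) ^ power.toNat)

-- ===== PRECONDITION & SPEC =====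
-- Pre_ excludes negative power: there Python evaluates 5 ** power in FLOAT arithmetic, so
-- A's result is an accident of float rounding (underflow to 0.0 makes every distance tie),
-- while B's integer formula raises ZeroDivisionError or yields a float there.
def Pre_GetClosestToZero (num : Int) (power : Int) : Prop := 0 ≤ power
instance (num : Int) (power : Int) : Decidable (Pre_GetClosestToZero num power) := by unfold Pre_GetClosestToZero; infer_instance
def pvWitness_GetClosestToZero : Int × Int := (7, 2)
def Spec_GetClosestToZero (num : Int) (power : Int) (out : Int) : Prop := out = GetClosestToZero_alt num power
instance (num : Int) (power : Int) (out : Int) : Decidable (Spec_GetClosestToZero num power out) := by unfold Spec_GetClosestToZero; infer_instance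

-- ===== CLAIM (what is proved, stated in full; the proofs are below) =====
def Claim_equal_GetClosestToZero : Prop := ∀ (num : Int) (power : Int), Dom_GetClosestToZero num power → Pre_GetClosestToZero num power → Spec_GetClosestToZero num power (GetClosestToZero num power)

-- ===== LEMMAS AND PROOFS =====
def Astep (num m : Int) (st : Option Int × Int × Int) (score : Int) : Option Int × Int × Int :=
  match st with
  | (some r, ret, val) => (some r, ret, val)
  | (none, ret, val) =>
    if |num - score * m| = 0 then (some score, ret, val)
    else if |num - score * m| < ret then (none, |num - score * m|, score)
    else (none, ret, val)

set_option maxHeartbeats 1000000 in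
lemma Acore_eq (num m : Int) :
    Acore num m =
      (match Astep num m (Astep num m (Astep num m (Astep num m (Astep num m
          (none, |num - (-2) * m|, -2) (-2)) (-1)) 0) 1) 2 with
       | (some r, _, _) => r
       | (none, _, val) => val) := rfl

lemma Bcore_eq (num m : Int) (hm : 0 < m) :
    Bcore num m = max (-2) (min 2 (if 2 * (num % m) < m then num / m else num / m + 1)) := by
  simp only [Bcore, PySem.Int.floordiv_eq_ediv_of_pos hm]
  have hrem : num - num / m * m = num % m := by rw [Int.emod_def]; ring
  rw [hrem]

lemma Astep_done (num m r ret val s : Int) :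
    Astep num m (some r, ret, val) s = (some r, ret, val) := rfl

lemma Astep_zero (num m ret val s : Int) (h0 : |num - s * m| = 0) :
    Astep num m (none, ret, val) s = (some s, ret, val) := by
  simp only [Astep]; rw [if_pos h0]

lemma Astep_upd (num m ret val s : Int) (h0 : ¬ |num - s * m| = 0) (h1 : |num - s * m| < ret) :
    Astep num m (none, ret, val) s = (none, |num - s * m|, s) := by
  simp only [Astep]; rw [if_neg h0, if_pos h1]

lemma Astep_keep (num m ret val s : Int) (h0 : ¬ |num - s * m| = 0) (h1 : ¬ |num - s * m| < ret) :
    Astep num m (none, ret, val) s = (none, ret, val) := by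
  simp only [Astep]; rw [if_neg h0, if_neg h1]

set_option maxHeartbeats 1000000 in
lemma core (num m : Int) (hm : 0 < m) (hodd : m % 2 = 1) : Acore num m = Bcore num m := by
  have hmne : m ≠ 0 := by omega
  have h1 : 0 ≤ num % m := Int.emod_nonneg num hmne
  have h2 : num % m < m := Int.emod_lt_of_pos num hm
  have hnum : m * (num / m) + num % m = num := Int.ediv_add_emod num m
  rw [Acore_eq, Bcore_eq num m hm]
  have hq : num / m ≤ -4 ∨ num / m = -3 ∨ num / m = -2 ∨ num / m = -1 ∨ num / m = 0 ∨
      num / m = 1 ∨ num / m = 2 ∨ num / m = 3 ∨ 4 ≤ num / m := by omega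
  generalize hqd : num / m = q at *
  generalize hrd : num % m = r at *
  clear hqd hrd
  rcases hq with h | h | h | h | h | h | h | h | h
  · -- q ≤ -4
    have hle : m * q ≤ m * (-4) := mul_le_mul_of_nonneg_left h hm.le
    have hb : num ≤ -4 * m + r := by nlinarith
    clear hnum
    by_cases hc : 2 * r < m
    · rw [if_pos hc]
      rw [Astep_keep num m (|num - (-2) * m|) (-2) (-2) (by simp only [Int.abs_eq_natAbs]; omega) (by simp only [Int.abs_eq_natAbs]; omega)]
      rw [Astep_keep num m (|num - (-2) * m|) (-2) (-1) (by simp only [Int.abs_eq_natAbs]; omega) (by simp only [Int.abs_eq_natAbs]; omega)]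
      rw [Astep_keep num m (|num - (-2) * m|) (-2) (0) (by simp only [Int.abs_eq_natAbs]; omega) (by simp only [Int.abs_eq_natAbs]; omega)]
      rw [Astep_keep num m (|num - (-2) * m|) (-2) (1) (by simp only [Int.abs_eq_natAbs]; omega) (by simp only [Int.abs_eq_natAbs]; omega)]
      rw [Astep_keep num m (|num - (-2) * m|) (-2) (2) (by simp only [Int.abs_eq_natAbs]; omega) (by simp only [Int.abs_eq_natAbs]; omega)]
      dsimp only
      simp only [max_def, min_def]
      split_ifs <;> omega
    · rw [if_neg hc]
      rw [Astep_keep num m (|num - (-2) * m|) (-2) (-2) (by simp only [Int.abs_eq_natAbs]; omega) (by simp only [Int.abs_eq_natAbs]; omega)]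
      rw [Astep_keep num m (|num - (-2) * m|) (-2) (-1) (by simp only [Int.abs_eq_natAbs]; omega) (by simp only [Int.abs_eq_natAbs]; omega)]
      rw [Astep_keep num m (|num - (-2) * m|) (-2) (0) (by simp only [Int.abs_eq_natAbs]; omega) (by simp only [Int.abs_eq_natAbs]; omega)]
      rw [Astep_keep num m (|num - (-2) * m|) (-2) (1) (by simp only [Int.abs_eq_natAbs]; omega) (by simp only [Int.abs_eq_natAbs]; omega)]
      rw [Astep_keep num m (|num - (-2) * m|) (-2) (2) (by simp only [Int.abs_eq_natAbs]; omega) (by simp only [Int.abs_eq_natAbs]; omega)]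
      dsimp only
      simp only [max_def, min_def]
      split_ifs <;> omega
  · -- q = -3
    subst h
    by_cases hc : 2 * r < m
    · rw [if_pos hc]
      rw [Astep_keep num m (|num - (-2) * m|) (-2) (-2) (by simp only [Int.abs_eq_natAbs]; omega) (by simp only [Int.abs_eq_natAbs]; omega)]
      rw [Astep_keep num m (|num - (-2) * m|) (-2) (-1) (by simp only [Int.abs_eq_natAbs]; omega) (by simp only [Int.abs_eq_natAbs]; omega)]
      rw [Astep_keep num m (|num - (-2) * m|) (-2) (0) (by simp only [Int.abs_eq_natAbs]; omega) (by simp only [Int.abs_eq_natAbs]; omega)]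
      rw [Astep_keep num m (|num - (-2) * m|) (-2) (1) (by simp only [Int.abs_eq_natAbs]; omega) (by simp only [Int.abs_eq_natAbs]; omega)]
      rw [Astep_keep num m (|num - (-2) * m|) (-2) (2) (by simp only [Int.abs_eq_natAbs]; omega) (by simp only [Int.abs_eq_natAbs]; omega)]
      dsimp only
      decide
    · rw [if_neg hc]
      rw [Astep_keep num m (|num - (-2) * m|) (-2) (-2) (by simp only [Int.abs_eq_natAbs]; omega) (by simp only [Int.abs_eq_natAbs]; omega)]
      rw [Astep_keep num m (|num - (-2) * m|) (-2) (-1) (by simp only [Int.abs_eq_natAbs]; omega) (by simp only [Int.abs_eq_natAbs]; omega)]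
      rw [Astep_keep num m (|num - (-2) * m|) (-2) (0) (by simp only [Int.abs_eq_natAbs]; omega) (by simp only [Int.abs_eq_natAbs]; omega)]
      rw [Astep_keep num m (|num - (-2) * m|) (-2) (1) (by simp only [Int.abs_eq_natAbs]; omega) (by simp only [Int.abs_eq_natAbs]; omega)]
      rw [Astep_keep num m (|num - (-2) * m|) (-2) (2) (by simp only [Int.abs_eq_natAbs]; omega) (by simp only [Int.abs_eq_natAbs]; omega)]
      dsimp only
      decide
  · -- q = -2
    subst h
    by_cases hc : 2 * r < m
    · rw [if_pos hc]
      by_cases hz : r = 0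
      · rw [Astep_zero num m (|num - (-2) * m|) (-2) (-2) (by simp only [Int.abs_eq_natAbs]; omega)]
        rw [Astep_done num m (-2) (|num - (-2) * m|) (-2) (-1)]
        rw [Astep_done num m (-2) (|num - (-2) * m|) (-2) (0)]
        rw [Astep_done num m (-2) (|num - (-2) * m|) (-2) (1)]
        rw [Astep_done num m (-2) (|num - (-2) * m|) (-2) (2)]
        dsimp only
        decide
      · rw [Astep_keep num m (|num - (-2) * m|) (-2) (-2) (by simp only [Int.abs_eq_natAbs]; omega) (by simp only [Int.abs_eq_natAbs]; omega)]
        rw [Astep_keep num m (|num - (-2) * m|) (-2) (-1) (by simp only [Int.abs_eq_natAbs]; omega) (by simp only [Int.abs_eq_natAbs]; omega)]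
        rw [Astep_keep num m (|num - (-2) * m|) (-2) (0) (by simp only [Int.abs_eq_natAbs]; omega) (by simp only [Int.abs_eq_natAbs]; omega)]
        rw [Astep_keep num m (|num - (-2) * m|) (-2) (1) (by simp only [Int.abs_eq_natAbs]; omega) (by simp only [Int.abs_eq_natAbs]; omega)]
        rw [Astep_keep num m (|num - (-2) * m|) (-2) (2) (by simp only [Int.abs_eq_natAbs]; omega) (by simp only [Int.abs_eq_natAbs]; omega)]
        dsimp only
        decide
    · rw [if_neg hc]
      rw [Astep_keep num m (|num - (-2) * m|) (-2) (-2) (by simp only [Int.abs_eq_natAbs]; omega) (by simp only [Int.abs_eq_natAbs]; omega)]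
      rw [Astep_upd num m (|num - (-2) * m|) (-2) (-1) (by simp only [Int.abs_eq_natAbs]; omega) (by simp only [Int.abs_eq_natAbs]; omega)]
      rw [Astep_keep num m (|num - (-1) * m|) (-1) (0) (by simp only [Int.abs_eq_natAbs]; omega) (by simp only [Int.abs_eq_natAbs]; omega)]
      rw [Astep_keep num m (|num - (-1) * m|) (-1) (1) (by simp only [Int.abs_eq_natAbs]; omega) (by simp only [Int.abs_eq_natAbs]; omega)]
      rw [Astep_keep num m (|num - (-1) * m|) (-1) (2) (by simp only [Int.abs_eq_natAbs]; omega) (by simp only [Int.abs_eq_natAbs]; omega)]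
      dsimp only
      decide
  · -- q = -1
    subst h
    by_cases hc : 2 * r < m
    · rw [if_pos hc]
      by_cases hz : r = 0
      · rw [Astep_keep num m (|num - (-2) * m|) (-2) (-2) (by simp only [Int.abs_eq_natAbs]; omega) (by simp only [Int.abs_eq_natAbs]; omega)]
        rw [Astep_zero num m (|num - (-2) * m|) (-2) (-1) (by simp only [Int.abs_eq_natAbs]; omega)]
        rw [Astep_done num m (-1) (|num - (-2) * m|) (-2) (0)]
        rw [Astep_done num m (-1) (|num - (-2) * m|) (-2) (1)]
        rw [Astep_done num m (-1) (|num - (-2) * m|) (-2) (2)]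
        dsimp only
        decide
      · rw [Astep_keep num m (|num - (-2) * m|) (-2) (-2) (by simp only [Int.abs_eq_natAbs]; omega) (by simp only [Int.abs_eq_natAbs]; omega)]
        rw [Astep_upd num m (|num - (-2) * m|) (-2) (-1) (by simp only [Int.abs_eq_natAbs]; omega) (by simp only [Int.abs_eq_natAbs]; omega)]
        rw [Astep_keep num m (|num - (-1) * m|) (-1) (0) (by simp only [Int.abs_eq_natAbs]; omega) (by simp only [Int.abs_eq_natAbs]; omega)]
        rw [Astep_keep num m (|num - (-1) * m|) (-1) (1) (by simp only [Int.abs_eq_natAbs]; omega) (by simp only [Int.abs_eq_natAbs]; omega)]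
        rw [Astep_keep num m (|num - (-1) * m|) (-1) (2) (by simp only [Int.abs_eq_natAbs]; omega) (by simp only [Int.abs_eq_natAbs]; omega)]
        dsimp only
        decide
    · rw [if_neg hc]
      rw [Astep_keep num m (|num - (-2) * m|) (-2) (-2) (by simp only [Int.abs_eq_natAbs]; omega) (by simp only [Int.abs_eq_natAbs]; omega)]
      rw [Astep_upd num m (|num - (-2) * m|) (-2) (-1) (by simp only [Int.abs_eq_natAbs]; omega) (by simp only [Int.abs_eq_natAbs]; omega)]
      rw [Astep_upd num m (|num - (-1) * m|) (-1) (0) (by simp only [Int.abs_eq_natAbs]; omega) (by simp only [Int.abs_eq_natAbs]; omega)]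
      rw [Astep_keep num m (|num - 0 * m|) (0) (1) (by simp only [Int.abs_eq_natAbs]; omega) (by simp only [Int.abs_eq_natAbs]; omega)]
      rw [Astep_keep num m (|num - 0 * m|) (0) (2) (by simp only [Int.abs_eq_natAbs]; omega) (by simp only [Int.abs_eq_natAbs]; omega)]
      dsimp only
      decide
  · -- q = 0
    subst h
    by_cases hc : 2 * r < m
    · rw [if_pos hc]
      by_cases hz : r = 0
      · rw [Astep_keep num m (|num - (-2) * m|) (-2) (-2) (by simp only [Int.abs_eq_natAbs]; omega) (by simp only [Int.abs_eq_natAbs]; omega)]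
        rw [Astep_upd num m (|num - (-2) * m|) (-2) (-1) (by simp only [Int.abs_eq_natAbs]; omega) (by simp only [Int.abs_eq_natAbs]; omega)]
        rw [Astep_zero num m (|num - (-1) * m|) (-1) (0) (by simp only [Int.abs_eq_natAbs]; omega)]
        rw [Astep_done num m (0) (|num - (-1) * m|) (-1) (1)]
        rw [Astep_done num m (0) (|num - (-1) * m|) (-1) (2)]
        dsimp only
        decide
      · rw [Astep_keep num m (|num - (-2) * m|) (-2) (-2) (by simp only [Int.abs_eq_natAbs]; omega) (by simp only [Int.abs_eq_natAbs]; omega)]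
        rw [Astep_upd num m (|num - (-2) * m|) (-2) (-1) (by simp only [Int.abs_eq_natAbs]; omega) (by simp only [Int.abs_eq_natAbs]; omega)]
        rw [Astep_upd num m (|num - (-1) * m|) (-1) (0) (by simp only [Int.abs_eq_natAbs]; omega) (by simp only [Int.abs_eq_natAbs]; omega)]
        rw [Astep_keep num m (|num - 0 * m|) (0) (1) (by simp only [Int.abs_eq_natAbs]; omega) (by simp only [Int.abs_eq_natAbs]; omega)]
        rw [Astep_keep num m (|num - 0 * m|) (0) (2) (by simp only [Int.abs_eq_natAbs]; omega) (by simp only [Int.abs_eq_natAbs]; omega)]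
        dsimp only
        decide
    · rw [if_neg hc]
      rw [Astep_keep num m (|num - (-2) * m|) (-2) (-2) (by simp only [Int.abs_eq_natAbs]; omega) (by simp only [Int.abs_eq_natAbs]; omega)]
      rw [Astep_upd num m (|num - (-2) * m|) (-2) (-1) (by simp only [Int.abs_eq_natAbs]; omega) (by simp only [Int.abs_eq_natAbs]; omega)]
      rw [Astep_upd num m (|num - (-1) * m|) (-1) (0) (by simp only [Int.abs_eq_natAbs]; omega) (by simp only [Int.abs_eq_natAbs]; omega)]
      rw [Astep_upd num m (|num - 0 * m|) (0) (1) (by simp only [Int.abs_eq_natAbs]; omega) (by simp only [Int.abs_eq_natAbs]; omega)]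
      rw [Astep_keep num m (|num - 1 * m|) (1) (2) (by simp only [Int.abs_eq_natAbs]; omega) (by simp only [Int.abs_eq_natAbs]; omega)]
      dsimp only
      decide
  · -- q = 1
    subst h
    by_cases hc : 2 * r < m
    · rw [if_pos hc]
      by_cases hz : r = 0
      · rw [Astep_keep num m (|num - (-2) * m|) (-2) (-2) (by simp only [Int.abs_eq_natAbs]; omega) (by simp only [Int.abs_eq_natAbs]; omega)]
        rw [Astep_upd num m (|num - (-2) * m|) (-2) (-1) (by simp only [Int.abs_eq_natAbs]; omega) (by simp only [Int.abs_eq_natAbs]; omega)]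
        rw [Astep_upd num m (|num - (-1) * m|) (-1) (0) (by simp only [Int.abs_eq_natAbs]; omega) (by simp only [Int.abs_eq_natAbs]; omega)]
        rw [Astep_zero num m (|num - 0 * m|) (0) (1) (by simp only [Int.abs_eq_natAbs]; omega)]
        rw [Astep_done num m (1) (|num - 0 * m|) (0) (2)]
        dsimp only
        decide
      · rw [Astep_keep num m (|num - (-2) * m|) (-2) (-2) (by simp only [Int.abs_eq_natAbs]; omega) (by simp only [Int.abs_eq_natAbs]; omega)]
        rw [Astep_upd num m (|num - (-2) * m|) (-2) (-1) (by simp only [Int.abs_eq_natAbs]; omega) (by simp only [Int.abs_eq_natAbs]; omega)]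
        rw [Astep_upd num m (|num - (-1) * m|) (-1) (0) (by simp only [Int.abs_eq_natAbs]; omega) (by simp only [Int.abs_eq_natAbs]; omega)]
        rw [Astep_upd num m (|num - 0 * m|) (0) (1) (by simp only [Int.abs_eq_natAbs]; omega) (by simp only [Int.abs_eq_natAbs]; omega)]
        rw [Astep_keep num m (|num - 1 * m|) (1) (2) (by simp only [Int.abs_eq_natAbs]; omega) (by simp only [Int.abs_eq_natAbs]; omega)]
        dsimp only
        decide
    · rw [if_neg hc]
      rw [Astep_keep num m (|num - (-2) * m|) (-2) (-2) (by simp only [Int.abs_eq_natAbs]; omega) (by simp only [Int.abs_eq_natAbs]; omega)]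
      rw [Astep_upd num m (|num - (-2) * m|) (-2) (-1) (by simp only [Int.abs_eq_natAbs]; omega) (by simp only [Int.abs_eq_natAbs]; omega)]
      rw [Astep_upd num m (|num - (-1) * m|) (-1) (0) (by simp only [Int.abs_eq_natAbs]; omega) (by simp only [Int.abs_eq_natAbs]; omega)]
      rw [Astep_upd num m (|num - 0 * m|) (0) (1) (by simp only [Int.abs_eq_natAbs]; omega) (by simp only [Int.abs_eq_natAbs]; omega)]
      rw [Astep_upd num m (|num - 1 * m|) (1) (2) (by simp only [Int.abs_eq_natAbs]; omega) (by simp only [Int.abs_eq_natAbs]; omega)]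
      dsimp only
      decide
  · -- q = 2
    subst h
    by_cases hc : 2 * r < m
    · rw [if_pos hc]
      by_cases hz : r = 0
      · rw [Astep_keep num m (|num - (-2) * m|) (-2) (-2) (by simp only [Int.abs_eq_natAbs]; omega) (by simp only [Int.abs_eq_natAbs]; omega)]
        rw [Astep_upd num m (|num - (-2) * m|) (-2) (-1) (by simp only [Int.abs_eq_natAbs]; omega) (by simp only [Int.abs_eq_natAbs]; omega)]
        rw [Astep_upd num m (|num - (-1) * m|) (-1) (0) (by simp only [Int.abs_eq_natAbs]; omega) (by simp only [Int.abs_eq_natAbs]; omega)]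
        rw [Astep_upd num m (|num - 0 * m|) (0) (1) (by simp only [Int.abs_eq_natAbs]; omega) (by simp only [Int.abs_eq_natAbs]; omega)]
        rw [Astep_zero num m (|num - 1 * m|) (1) (2) (by simp only [Int.abs_eq_natAbs]; omega)]
        dsimp only
        decide
      · rw [Astep_keep num m (|num - (-2) * m|) (-2) (-2) (by simp only [Int.abs_eq_natAbs]; omega) (by simp only [Int.abs_eq_natAbs]; omega)]
        rw [Astep_upd num m (|num - (-2) * m|) (-2) (-1) (by simp only [Int.abs_eq_natAbs]; omega) (by simp only [Int.abs_eq_natAbs]; omega)]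
        rw [Astep_upd num m (|num - (-1) * m|) (-1) (0) (by simp only [Int.abs_eq_natAbs]; omega) (by simp only [Int.abs_eq_natAbs]; omega)]
        rw [Astep_upd num m (|num - 0 * m|) (0) (1) (by simp only [Int.abs_eq_natAbs]; omega) (by simp only [Int.abs_eq_natAbs]; omega)]
        rw [Astep_upd num m (|num - 1 * m|) (1) (2) (by simp only [Int.abs_eq_natAbs]; omega) (by simp only [Int.abs_eq_natAbs]; omega)]
        dsimp only
        decide
    · rw [if_neg hc]
      rw [Astep_keep num m (|num - (-2) * m|) (-2) (-2) (by simp only [Int.abs_eq_natAbs]; omega) (by simp only [Int.abs_eq_natAbs]; omega)]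
      rw [Astep_upd num m (|num - (-2) * m|) (-2) (-1) (by simp only [Int.abs_eq_natAbs]; omega) (by simp only [Int.abs_eq_natAbs]; omega)]
      rw [Astep_upd num m (|num - (-1) * m|) (-1) (0) (by simp only [Int.abs_eq_natAbs]; omega) (by simp only [Int.abs_eq_natAbs]; omega)]
      rw [Astep_upd num m (|num - 0 * m|) (0) (1) (by simp only [Int.abs_eq_natAbs]; omega) (by simp only [Int.abs_eq_natAbs]; omega)]
      rw [Astep_upd num m (|num - 1 * m|) (1) (2) (by simp only [Int.abs_eq_natAbs]; omega) (by simp only [Int.abs_eq_natAbs]; omega)]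
      dsimp only
      decide
  · -- q = 3
    subst h
    by_cases hc : 2 * r < m
    · rw [if_pos hc]
      rw [Astep_keep num m (|num - (-2) * m|) (-2) (-2) (by simp only [Int.abs_eq_natAbs]; omega) (by simp only [Int.abs_eq_natAbs]; omega)]
      rw [Astep_upd num m (|num - (-2) * m|) (-2) (-1) (by simp only [Int.abs_eq_natAbs]; omega) (by simp only [Int.abs_eq_natAbs]; omega)]
      rw [Astep_upd num m (|num - (-1) * m|) (-1) (0) (by simp only [Int.abs_eq_natAbs]; omega) (by simp only [Int.abs_eq_natAbs]; omega)]
      rw [Astep_upd num m (|num - 0 * m|) (0) (1) (by simp only [Int.abs_eq_natAbs]; omega) (by simp only [Int.abs_eq_natAbs]; omega)]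
      rw [Astep_upd num m (|num - 1 * m|) (1) (2) (by simp only [Int.abs_eq_natAbs]; omega) (by simp only [Int.abs_eq_natAbs]; omega)]
      dsimp only
      decide
    · rw [if_neg hc]
      rw [Astep_keep num m (|num - (-2) * m|) (-2) (-2) (by simp only [Int.abs_eq_natAbs]; omega) (by simp only [Int.abs_eq_natAbs]; omega)]
      rw [Astep_upd num m (|num - (-2) * m|) (-2) (-1) (by simp only [Int.abs_eq_natAbs]; omega) (by simp only [Int.abs_eq_natAbs]; omega)]
      rw [Astep_upd num m (|num - (-1) * m|) (-1) (0) (by simp only [Int.abs_eq_natAbs]; omega) (by simp only [Int.abs_eq_natAbs]; omega)]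
      rw [Astep_upd num m (|num - 0 * m|) (0) (1) (by simp only [Int.abs_eq_natAbs]; omega) (by simp only [Int.abs_eq_natAbs]; omega)]
      rw [Astep_upd num m (|num - 1 * m|) (1) (2) (by simp only [Int.abs_eq_natAbs]; omega) (by simp only [Int.abs_eq_natAbs]; omega)]
      dsimp only
      decide
  · -- 4 ≤ q
    have hle : m * 4 ≤ m * q := mul_le_mul_of_nonneg_left h hm.le
    have hb : 4 * m + r ≤ num := by nlinarith
    clear hnum
    by_cases hc : 2 * r < m
    · rw [if_pos hc]
      rw [Astep_keep num m (|num - (-2) * m|) (-2) (-2) (by simp only [Int.abs_eq_natAbs]; omega) (by simp only [Int.abs_eq_natAbs]; omega)]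
      rw [Astep_upd num m (|num - (-2) * m|) (-2) (-1) (by simp only [Int.abs_eq_natAbs]; omega) (by simp only [Int.abs_eq_natAbs]; omega)]
      rw [Astep_upd num m (|num - (-1) * m|) (-1) (0) (by simp only [Int.abs_eq_natAbs]; omega) (by simp only [Int.abs_eq_natAbs]; omega)]
      rw [Astep_upd num m (|num - 0 * m|) (0) (1) (by simp only [Int.abs_eq_natAbs]; omega) (by simp only [Int.abs_eq_natAbs]; omega)]
      rw [Astep_upd num m (|num - 1 * m|) (1) (2) (by simp only [Int.abs_eq_natAbs]; omega) (by simp only [Int.abs_eq_natAbs]; omega)]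
      dsimp only
      simp only [max_def, min_def]
      split_ifs <;> omega
    · rw [if_neg hc]
      rw [Astep_keep num m (|num - (-2) * m|) (-2) (-2) (by simp only [Int.abs_eq_natAbs]; omega) (by simp only [Int.abs_eq_natAbs]; omega)]
      rw [Astep_upd num m (|num - (-2) * m|) (-2) (-1) (by simp only [Int.abs_eq_natAbs]; omega) (by simp only [Int.abs_eq_natAbs]; omega)]
      rw [Astep_upd num m (|num - (-1) * m|) (-1) (0) (by simp only [Int.abs_eq_natAbs]; omega) (by simp only [Int.abs_eq_natAbs]; omega)]
      rw [Astep_upd num m (|num - 0 * m|) (0) (1) (by simp only [Int.abs_eq_natAbs]; omega) (by simp only [Int.abs_eq_natAbs]; omega)]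
      rw [Astep_upd num m (|num - 1 * m|) (1) (2) (by simp only [Int.abs_eq_natAbs]; omega) (by simp only [Int.abs_eq_natAbs]; omega)]
      dsimp only
      simp only [max_def, min_def]
      split_ifs <;> omega

-- ===== VERDICT (by name: the statement is the Claim_ definition above) =====
theorem GetClosestToZero_spec : Claim_equal_GetClosestToZero := by
  intro num power _ hpre
  unfold Spec_GetClosestToZero GetClosestToZero GetClosestToZero_alt
  rw [if_pos (show (0:Int) ≤ power from hpre)]
  exact core num ((5 : Int) ^ power.toNat) (pow_pos (by norm_num) _)
    (Int.odd_iff.mp (Odd.pow (by decide : Odd (5 : Int))))
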